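-- pv_equiv track=rewrite | github.com/simomarsili/ndd | ndd/utils.py | camelcase_to_delimited
-- ===== SOURCE A (Python) =====
-- def camelcase_to_delimited(string, d='_', remove=None):
--     """Convert string from CamelCase to delimiter_separated."""
--     result = []
--     for i, c in enumerate(string):
--         if c.isupper():
--             if i > 0:
--                 result.append(d)
--         result.append(c.lower())
--     result = ''.join(result)
--     if remove and remove in result:
--         remove = remove.lower()
--         result = d.join([x for x in result.split(d) if x != remove])
--     return result
-- ===== SOURCE B (Python) =====
-- def camelcase_to_delimited(string, d='_', remove=None):
--     """Convert string from CamelCase to delimiter_separated."""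
--     tokens = []
--     rest = string
--     while rest:
--         j = 1
--         while j < len(rest) and not rest[j].isupper():
--             j += 1
--         tokens.append(rest[:j].lower())
--         rest = rest[j:]
--     result = d.join(tokens)
--     if remove and remove in result:
--         remove = remove.lower()
--         result = d.join([x for x in result.split(d) if x != remove])
--     return result
-- ===== Notes on version B (the rewrite author's own statement) =====
-- stated objective: alternative
-- what changed: A emits the result character by character (inserting d before each non-initial uppercase); B tokenizes the string into maximal segments starting at each uppercase boundary by an outer scan over suffixes, lowercases the segments and joins them with d; the remove step is unchanged.
import Mathlib
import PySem

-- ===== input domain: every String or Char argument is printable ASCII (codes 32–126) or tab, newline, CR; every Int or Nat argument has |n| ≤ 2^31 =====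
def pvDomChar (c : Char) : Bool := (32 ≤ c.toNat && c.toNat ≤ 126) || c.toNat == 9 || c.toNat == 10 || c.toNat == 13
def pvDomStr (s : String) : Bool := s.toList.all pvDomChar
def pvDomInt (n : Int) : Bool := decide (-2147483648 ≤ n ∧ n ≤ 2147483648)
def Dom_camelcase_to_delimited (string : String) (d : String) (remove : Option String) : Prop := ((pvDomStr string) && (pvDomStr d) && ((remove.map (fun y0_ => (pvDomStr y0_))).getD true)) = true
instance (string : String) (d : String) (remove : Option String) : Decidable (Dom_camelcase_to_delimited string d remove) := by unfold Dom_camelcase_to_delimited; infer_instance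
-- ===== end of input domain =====

-- B tokenizes the string into maximal segments starting at each uppercase boundary and joins
-- the lowered segments with d, instead of A's per-character emit loop; same remove step.
-- Pre_ only excludes the inputs on which the Python A raises ValueError (d = '' with a truthy
-- remove occurring in the converted string); A and B agree everywhere else.

-- ===== PORT A =====
-- shared remove step: the final `if remove and remove in result: …` of BOTH Pythons (identical code)
def pvRemoveStep (dl : List Char) (remove : Option String) (result : List Char) : List Char :=
  match remove with
  | none => result
  | some r =>
      if r.toList ≠ [] ∧ PySem.Chars.isIn r.toList result = true then
        match PySem.Chars.split? result dl with
        | some parts => PySem.Chars.join dl (parts.filter (fun x => x ≠ PySem.Chars.lower r.toList))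
        | none => []  -- Python raises ValueError here (empty separator); excluded by Pre_
      else result

-- the `for i, c in enumerate(string)` loop of A, state = (remaining chars, i, result)
def pvALoop (dl : List Char) : List Char → Nat → List Char → List Char
  | [], _, acc => acc
  | c :: rest, i, acc =>
      pvALoop dl rest (i + 1)
        (if PySem.Chars.isupper c then
           (if i > 0 then acc ++ dl else acc) ++ [PySem.Chars.lowerChar c]
         else acc ++ [PySem.Chars.lowerChar c])

def camelcase_to_delimited (string : String) (d : String) (remove : Option String) : String :=
  String.ofList (pvRemoveStep d.toList remove (pvALoop d.toList string.toList 0 []))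

-- ===== PORT B =====
-- the inner `while j < len(rest) and not rest[j].isupper(): j += 1` scan (it computes j - 1)
def pvLowSpan : List Char → Nat
  | [] => 0
  | c :: r => if PySem.Chars.isupper c then 0 else 1 + pvLowSpan r

-- the outer `while rest:` loop of B: token rest[:j], continue on rest[j:]
def pvBTokens : List Char → List (List Char)
  | [] => []
  | c :: r =>
      let j := 1 + pvLowSpan r
      PySem.Chars.lower (List.take j (c :: r)) :: pvBTokens (List.drop j (c :: r))
  termination_by s => s.length
  decreasing_by simp

def camelcase_to_delimited_alt (string : String) (d : String) (remove : Option String) : String :=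
  String.ofList (pvRemoveStep d.toList remove (PySem.Chars.join d.toList (pvBTokens string.toList)))

-- ===== PRECONDITION & SPEC =====
-- Pre_ excludes exactly the inputs on which the Python A raises ValueError: d = '' together with a
-- non-empty remove that occurs in the converted string (which, for d = '', is string.lower()).
def Pre_camelcase_to_delimited (string : String) (d : String) (remove : Option String) : Prop :=
  d ≠ "" ∨ remove.getD "" = "" ∨
    PySem.Chars.isIn (remove.getD "").toList (PySem.Chars.lower string.toList) = false
instance (string : String) (d : String) (remove : Option String) : Decidable (Pre_camelcase_to_delimited string d remove) := by unfold Pre_camelcase_to_delimited; infer_instance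

def pvWitness_camelcase_to_delimited : String × String × Option String := ("CamelCase", "_", some "camel")

def Spec_camelcase_to_delimited (string : String) (d : String) (remove : Option String) (out : String) : Prop := out = camelcase_to_delimited_alt string d remove
instance (string : String) (d : String) (remove : Option String) (out : String) : Decidable (Spec_camelcase_to_delimited string d remove out) := by unfold Spec_camelcase_to_delimited; infer_instance

-- ===== CLAIM (what is proved, stated in full; the proofs are below) =====
def Claim_equal_camelcase_to_delimited : Prop := ∀ (string : String) (d : String) (remove : Option String), Dom_camelcase_to_delimited string d remove → Pre_camelcase_to_delimited string d remove → Spec_camelcase_to_delimited string d remove (camelcase_to_delimited string d remove)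

-- ===== LEMMAS AND PROOFS =====

theorem pvALoop_acc (dl : List Char) (s : List Char) (i : Nat) (acc : List Char) :
    pvALoop dl s i acc = acc ++ pvALoop dl s i [] := by
  induction s generalizing i acc with
  | nil => simp [pvALoop]
  | cons c r ih =>
      simp only [pvALoop]
      split_ifs with h1 h2
      · rw [ih _ ((acc ++ dl) ++ [PySem.Chars.lowerChar c]),
          ih _ (([] ++ dl) ++ [PySem.Chars.lowerChar c])]
        simp
      · rw [ih _ (acc ++ [PySem.Chars.lowerChar c]), ih _ ([] ++ [PySem.Chars.lowerChar c])]
        simp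
      · rw [ih _ (acc ++ [PySem.Chars.lowerChar c]), ih _ ([] ++ [PySem.Chars.lowerChar c])]
        simp

theorem pvALoop_pos (dl : List Char) (s : List Char) (i j : Nat) (acc : List Char) :
    pvALoop dl s (i + 1) acc = pvALoop dl s (j + 1) acc := by
  induction s generalizing i j acc with
  | nil => rfl
  | cons c r ih =>
      simp only [pvALoop]
      exact ih (i + 1) (j + 1) _

theorem pvALoop_zero_cons (dl : List Char) (c : Char) (r : List Char) :
    pvALoop dl (c :: r) 0 [] = PySem.Chars.lowerChar c :: pvALoop dl r 1 [] := by
  simp only [pvALoop, gt_iff_lt, Nat.lt_irrefl, if_false]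
  rw [pvALoop_acc]
  split_ifs <;> simp

theorem pvALoop_one_cons (dl : List Char) (x : Char) (r : List Char) :
    pvALoop dl (x :: r) 1 [] =
      (if PySem.Chars.isupper x then dl else []) ++ PySem.Chars.lowerChar x :: pvALoop dl r 1 [] := by
  simp only [pvALoop, gt_iff_lt, Nat.zero_lt_one, if_true]
  rw [pvALoop_acc, pvALoop_pos dl r 1 0]
  split_ifs <;> simp

-- A's loop at positions > 0 over a run of non-uppercase characters just lowercases them
theorem pvALoop_one_append (dl : List Char) (t v : List Char)
    (h : ∀ x ∈ t, PySem.Chars.isupper x = false) :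
    pvALoop dl (t ++ v) 1 [] = PySem.Chars.lower t ++ pvALoop dl v 1 [] := by
  induction t with
  | nil => simp [PySem.Chars.lower]
  | cons x t ih =>
      rw [List.cons_append, pvALoop_one_cons, h x (by simp),
        ih (fun y hy => h y (by simp [hy]))]
      simp [PySem.Chars.lower]

theorem pvLowSpan_eq (r : List Char) :
    pvLowSpan r = (r.takeWhile (fun x => !PySem.Chars.isupper x)).length := by
  induction r with
  | nil => rfl
  | cons x r ih =>
      simp only [pvLowSpan, List.takeWhile_cons]
      by_cases h : PySem.Chars.isupper x <;> simp [h, ih, Nat.add_comm]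

theorem dropWhile_head_upper (r : List Char) (x : Char) (u : List Char)
    (h : r.dropWhile (fun y => !PySem.Chars.isupper y) = x :: u) :
    PySem.Chars.isupper x = true := by
  induction r with
  | nil => simp at h
  | cons c r ih =>
      rw [List.dropWhile_cons] at h
      by_cases hc : PySem.Chars.isupper c
      · simp [hc] at h; rw [← h.1]; exact hc
      · simp [hc] at h; exact ih h

-- the two first phases agree: A's emit loop equals d-join of B's lowered tokens
theorem phase1_eq (dl : List Char) : ∀ (n : Nat) (s : List Char), s.length ≤ n →
    pvALoop dl s 0 [] = PySem.Chars.join dl (pvBTokens s) := by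
  intro n
  induction n with
  | zero =>
      intro s hs
      rw [List.length_eq_zero_iff.mp (Nat.le_zero.mp hs), pvBTokens.eq_def]
      simp [pvALoop, PySem.Chars.join_nil]
  | succ n ih =>
      intro s hs
      match s with
      | [] =>
          rw [pvBTokens.eq_def]
          simp [pvALoop, PySem.Chars.join_nil]
      | c :: r =>
        have hr : r.length ≤ n := by simpa using hs
        set t := r.takeWhile (fun y => !PySem.Chars.isupper y) with ht
        set u := r.dropWhile (fun y => !PySem.Chars.isupper y) with hu
        have hru : r = t ++ u := (List.takeWhile_append_dropWhile ..).symm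
        have htake : List.take (1 + pvLowSpan r) (c :: r) = c :: t := by
          rw [pvLowSpan_eq, Nat.add_comm, List.take_succ_cons, ← ht]
          congr 1
          exact (List.prefix_iff_eq_take.mp (List.takeWhile_prefix _)).symm
        have hdrop : List.drop (1 + pvLowSpan r) (c :: r) = u := by
          rw [pvLowSpan_eq, Nat.add_comm, List.drop_succ_cons, ← ht, hru,
            List.drop_left]
        have ht_no : ∀ x ∈ t, PySem.Chars.isupper x = false := by
          intro x hx
          have := List.mem_takeWhile_imp (ht ▸ hx)
          simpa using this
        rw [pvALoop_zero_cons, pvBTokens.eq_def]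
        simp only [htake, hdrop]
        match hu' : u with
        | [] =>
            have hrt : r = t := by simpa [hu'] using hru
            rw [hrt, ← List.append_nil t, pvALoop_one_append dl t [] ht_no,
              pvBTokens.eq_def]
            simp [pvALoop, PySem.Chars.join_singleton, PySem.Chars.lower]
        | x :: u' =>
            have hx : PySem.Chars.isupper x = true :=
              dropWhile_head_upper r x u' hu.symm
            have hlen : (x :: u').length ≤ r.length := by
              rw [hu]; exact List.length_dropWhile_le _ _
            have hIH : pvALoop dl (x :: u') 0 [] = PySem.Chars.join dl (pvBTokens (x :: u')) :=
              ih (x :: u') (le_trans hlen hr)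
            rw [pvALoop_zero_cons] at hIH
            obtain ⟨p, q, hpq⟩ : ∃ p q, pvBTokens (x :: u') = p :: q := by
              rw [pvBTokens.eq_def]; exact ⟨_, _, rfl⟩
            rw [hru, pvALoop_one_append dl t (x :: u') ht_no, pvALoop_one_cons, hx]
            rw [hpq, PySem.Chars.join_cons_cons, ← hpq, ← hIH]
            simp [PySem.Chars.lower]

-- ===== VERDICT (by name: the statement is the Claim_ definition above) =====
theorem camelcase_to_delimited_spec : Claim_equal_camelcase_to_delimited := by
  intro string d remove _ _
  unfold Spec_camelcase_to_delimited camelcase_to_delimited camelcase_to_delimited_alt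
  rw [phase1_eq d.toList string.toList.length string.toList (le_refl _)]
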